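-- pv_equiv track=rewrite | github.com/gwedosun/corpora-analysis | ex1.py | ocorrencias
-- ===== SOURCE A (Python) =====
-- def ocorrencias(texto):
--     contar_letras = {}
--     for letra in texto:
--         if letra.isalpha():
--             contar_letras[letra] = contar_letras.get(letra, 0) + 1
--
--     letras_ordenadas = sorted(contar_letras.items(), key=lambda item: item[1], reverse=True)
--
--     letras_menos_frequentes = sorted(contar_letras.items(), key=lambda item: item[1])
--
--     hapax = [letra for letra, frequencia in contar_letras.items() if frequencia == 1]
--
--     return letras_ordenadas, letras_menos_frequentes, hapax
-- ===== SOURCE B (Python) =====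
-- def ocorrencias(texto):
--     letras = []
--     for letra in texto:
--         if letra.isalpha() and letra not in letras:
--             letras.append(letra)
--
--     items = [(letra, sum(1 for ch in texto if ch == letra)) for letra in letras]
--
--     hapax = [letra for letra, frequencia in items if frequencia == 1]
--
--     maxf = max((f for _, f in items), default=0)
--     letras_ordenadas = []
--     letras_menos_frequentes = []
--     for f in range(1, maxf + 1):
--         bucket = [it for it in items if it[1] == f]
--         letras_menos_frequentes += bucket
--         letras_ordenadas = bucket + letras_ordenadas
--
--     return letras_ordenadas, letras_menos_frequentes, hapax
-- ===== Notes on version B (the rewrite author's own statement) =====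
-- stated objective: alternative
-- what changed: B replaces A's dict-based counting and two stable comparison sorts by a first-appearance scan of the distinct letters, a per-letter occurrence count, and a single counting-sort loop over frequencies 1..maxf that appends each bucket to the ascending list and prepends it to the descending list.
import Mathlib
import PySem

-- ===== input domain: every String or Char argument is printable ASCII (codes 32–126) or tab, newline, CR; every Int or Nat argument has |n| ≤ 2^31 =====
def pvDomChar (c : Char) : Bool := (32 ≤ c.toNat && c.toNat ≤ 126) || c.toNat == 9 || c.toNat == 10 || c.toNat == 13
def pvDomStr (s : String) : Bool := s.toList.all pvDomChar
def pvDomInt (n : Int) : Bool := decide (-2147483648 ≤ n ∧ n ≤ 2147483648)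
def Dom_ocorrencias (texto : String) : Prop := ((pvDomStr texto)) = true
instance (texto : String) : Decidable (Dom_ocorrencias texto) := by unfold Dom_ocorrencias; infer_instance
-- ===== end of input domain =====

-- B replaces A's dict counting + two comparison sorts by a first-appearance scan of
-- distinct letters, a per-letter occurrence count, and one counting-sort loop over
-- frequencies that builds the ascending and descending lists together; same value.


-- ===== PORT A =====
-- A's counting loop: 'for letra in texto: if letra.isalpha(): contar[letra] = contar.get(letra, 0) + 1'
def ocorrenciasCount (texto : String) : PySem.Dict String Int :=
  texto.toList.foldl
    (fun d letra =>
      if PySem.Str.isalpha letra then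
        d.insert (String.ofList [letra]) (d.getD (String.ofList [letra]) 0 + 1)
      else d)
    PySem.Dict.empty

def ocorrencias (texto : String) : (List (String × Int)) × (List (String × Int)) × List String :=
  let contar_letras := ocorrenciasCount texto
  let letras_ordenadas := PySem.List.sorted contar_letras.items (fun item => item.2) true
  let letras_menos_frequentes := PySem.List.sorted contar_letras.items (fun item => item.2) false
  let hapax := (contar_letras.items.filter (fun it => it.2 == 1)).map (fun it => it.1)
  (letras_ordenadas, letras_menos_frequentes, hapax)

-- ===== PORT B =====
-- Source B's first-appearance scan: 'if letra.isalpha() and letra not in letras: letras.append(letra)'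
def ocorrenciasAltLetras (texto : String) : List String :=
  texto.toList.foldl
    (fun ls letra =>
      if PySem.Str.isalpha letra && !(ls.contains (String.ofList [letra])) then
        ls ++ [String.ofList [letra]]
      else ls)
    []

-- 'sum(1 for ch in texto if ch == letra)'
def ocorrenciasAltConta (texto : String) (letra : String) : Int :=
  texto.toList.foldl (fun n ch => if String.ofList [ch] == letra then n + 1 else n) 0

def ocorrencias_alt (texto : String) : (List (String × Int)) × (List (String × Int)) × List String :=
  let items := (ocorrenciasAltLetras texto).map
    (fun letra => (letra, ocorrenciasAltConta texto letra))
  let hapax := (items.filter (fun it => it.2 == 1)).map (fun it => it.1)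
  let maxf := PySem.List.maxD (items.map (fun it => it.2)) (fun v => v) 0
  let st := (PySem.List.pyRange 1 (maxf + 1)).foldl
    (fun (st : List (String × Int) × List (String × Int)) f =>
      let bucket := items.filter (fun it => it.2 == f)
      (bucket ++ st.1, st.2 ++ bucket))
    ([], [])
  (st.1, st.2, hapax)

-- ===== PRECONDITION & SPEC =====
def Spec_ocorrencias (texto : String) (out : (List (String × Int)) × (List (String × Int)) × List String) : Prop := out = ocorrencias_alt texto
instance (texto : String) (out : (List (String × Int)) × (List (String × Int)) × List String) : Decidable (Spec_ocorrencias texto out) := by unfold Spec_ocorrencias; infer_instance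

-- ===== CLAIM (what is proved, stated in full; the proofs are below) =====
def Claim_equal_ocorrencias : Prop := ∀ (texto : String), Dom_ocorrencias texto → Spec_ocorrencias texto (ocorrencias texto)

-- ===== LEMMAS AND PROOFS =====

-- a fold guarded by isalpha is a fold over the alpha letters, turned into 1-char strings
theorem foldl_alpha_guard {β : Type} (g : β → String → β) (l : List Char) (b : β) :
    l.foldl (fun b c => if PySem.Str.isalpha c then g b (String.ofList [c]) else b) b
      = ((l.filter (fun c => PySem.Str.isalpha c)).map (fun c => String.ofList [c])).foldl g b := by
  induction l generalizing b with
  | nil => rfl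
  | cons c t ih =>
    by_cases hc : PySem.Str.isalpha c
    · simp [hc, ih]
    · simp [hc, ih]

-- insertBy walks past a block it is not 'before'
theorem insertBy_append_of_forall_not_before {α : Type} (before : α → α → Bool) (x : α)
    (ys zs : List α) (h : ∀ y ∈ ys, before x y = false) :
    PySem.List.insertBy before x (ys ++ zs) = ys ++ PySem.List.insertBy before x zs := by
  induction ys with
  | nil => simp
  | cons y t ih =>
    simp only [List.cons_append, PySem.List.insertBy, h y (by simp)]
    simp only [Bool.false_eq_true, if_false, List.cons.injEq, true_and]
    exact ih (fun y hy => h y (by simp [hy]))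

-- insertBy drops in front of a list it is 'before' everywhere
theorem insertBy_of_forall_before {α : Type} (before : α → α → Bool) (x : α)
    (zs : List α) (h : ∀ y ∈ zs, before x y = true) :
    PySem.List.insertBy before x zs = x :: zs := by
  cases zs with
  | nil => rfl
  | cons y t => simp [PySem.List.insertBy, h y (by simp)]

-- one insertion lands at the end of its own bucket
theorem insertBy_buckets {α : Type} (key : α → Int) (lt : Int → Int → Bool)
    (hirr : ∀ a, lt a a = false) (hasym : ∀ a b, lt a b = true → lt b a = false)
    (x : α) (xs : List α) (ks : List Int)
    (hks : ks.Pairwise (fun a b => lt a b = true)) (hmem : key x ∈ ks) :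
    PySem.List.insertBy (fun a b => lt (key a) (key b)) x
        (ks.flatMap fun k => xs.filter fun y => key y == k)
      = ks.flatMap fun k => (xs ++ [x]).filter fun y => key y == k := by
  induction ks with
  | nil => cases hmem
  | cons k ks' ih =>
    rw [List.pairwise_cons] at hks
    obtain ⟨hk, hks'⟩ := hks
    by_cases hxk : key x = k
    · have hskip : ∀ y ∈ xs.filter (fun y => key y == k), (fun a b => lt (key a) (key b)) x y = false := by
        intro y hy
        have hyk : key y = k := by simpa using List.of_mem_filter hy
        simp [hyk, hxk, hirr]
      have hfront : ∀ y ∈ ks'.flatMap (fun k => xs.filter fun y => key y == k),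
          (fun a b => lt (key a) (key b)) x y = true := by
        intro y hy
        obtain ⟨k', hk', hyf⟩ := List.mem_flatMap.mp hy
        have hyk : key y = k' := by simpa using List.of_mem_filter hyf
        simp only [hyk, hxk]
        exact hk k' hk'
      have htail : ∀ k' ∈ ks', ((xs ++ [x]).filter fun y => key y == k') = xs.filter fun y => key y == k' := by
        intro k' hk'
        have hne : key x ≠ k' := by
          intro he
          have hkk : lt k k' = true := hk k' hk'
          rw [hxk] at he
          rw [← he, hirr k] at hkk
          exact Bool.false_ne_true hkk
        simp [List.filter_append, hne]
      have hbk : ((xs ++ [x]).filter fun y => key y == k) = (xs.filter fun y => key y == k) ++ [x] := by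
        simp [List.filter_append, hxk]
      rw [List.flatMap_cons, List.flatMap_cons,
        insertBy_append_of_forall_not_before (fun a b => lt (key a) (key b)) x _ _ hskip,
        insertBy_of_forall_before (fun a b => lt (key a) (key b)) x _ hfront,
        hbk, List.flatMap_congr htail]
      simp
    · have hmem' : key x ∈ ks' := by
        cases List.mem_cons.mp hmem with
        | inl h => exact absurd h hxk
        | inr h => exact h
      have hskip : ∀ y ∈ xs.filter (fun y => key y == k), (fun a b => lt (key a) (key b)) x y = false := by
        intro y hy
        have hyk : key y = k := by simpa using List.of_mem_filter hy
        simp only [hyk]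
        exact hasym k (key x) (hk _ hmem')
      have hbk : ((xs ++ [x]).filter fun y => key y == k) = xs.filter fun y => key y == k := by
        simp [List.filter_append, hxk]
      rw [List.flatMap_cons, List.flatMap_cons,
        insertBy_append_of_forall_not_before (fun a b => lt (key a) (key b)) x _ _ hskip,
        hbk, ih hks' hmem']

-- the whole insertion sort is the bucket concatenation
theorem foldl_insertBy_buckets {α : Type} (key : α → Int) (lt : Int → Int → Bool)
    (hirr : ∀ a, lt a a = false) (hasym : ∀ a b, lt a b = true → lt b a = false)
    (xs : List α) (ks : List Int)
    (hks : ks.Pairwise (fun a b => lt a b = true)) (hall : ∀ x ∈ xs, key x ∈ ks) :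
    xs.foldl (fun acc x => PySem.List.insertBy (fun a b => lt (key a) (key b)) x acc) []
      = ks.flatMap fun k => xs.filter fun y => key y == k := by
  induction xs using List.reverseRecOn with
  | nil => simp
  | append_singleton xs x ih =>
    rw [List.foldl_append, List.foldl_cons, List.foldl_nil,
      ih (fun y hy => hall y (by simp [hy])),
      insertBy_buckets key lt hirr hasym x xs ks hks (hall x (by simp))]

-- every value is ≤ max(values, default=0)
theorem le_maxD_of_mem (vs : List Int) (v : Int) (hv : v ∈ vs) :
    v ≤ PySem.List.maxD vs (fun x => x) 0 := by
  unfold PySem.List.maxD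
  cases hm : PySem.List.max? vs (fun x => x) with
  | none =>
    rw [PySem.List.max?_eq_none_iff] at hm
    rw [hm] at hv; cases hv
  | some m =>
    simpa using PySem.List.max?_isMax hm v hv

-- Source B's single bucket loop builds (descending, ascending) at once
theorem foldl_buckets_pair {α : Type} (bucket : Int → List α) (ks : List Int)
    (st : List α × List α) :
    ks.foldl (fun st f => (bucket f ++ st.1, st.2 ++ bucket f)) st
      = (ks.reverse.flatMap bucket ++ st.1, st.2 ++ ks.flatMap bucket) := by
  induction ks generalizing st with
  | nil => simp
  | cons k t ih => simp [ih]

-- A's items: counting the alpha letters, as the Counter of the 1-char strings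
theorem ocorrenciasCount_items (texto : String) :
    (ocorrenciasCount texto).items
      = (PySem.Set.ofList ((texto.toList.filter (fun c => PySem.Str.isalpha c)).map
          (fun c => String.ofList [c]))).map
          (fun k => (k, (((texto.toList.filter (fun c => PySem.Str.isalpha c)).map
            (fun c => String.ofList [c])).count k : Int))) := by
  unfold ocorrenciasCount
  rw [foldl_alpha_guard (fun (d : PySem.Dict String Int) (k : String) => d.insert k (d.getD k 0 + 1))
      texto.toList PySem.Dict.empty,
    PySem.Dict.foldl_insert_getD_add_one_eq_counter, PySem.Dict.items_counter]

-- B's distinct-letter scan is set(of the same list), first occurrences in order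
theorem ocorrenciasAltLetras_eq (texto : String) :
    ocorrenciasAltLetras texto
      = PySem.Set.ofList ((texto.toList.filter (fun c => PySem.Str.isalpha c)).map
          (fun c => String.ofList [c])) := by
  unfold ocorrenciasAltLetras
  have hstep : (fun (ls : List String) (letra : Char) =>
      if PySem.Str.isalpha letra && !(ls.contains (String.ofList [letra])) then
        ls ++ [String.ofList [letra]]
      else ls)
    = (fun ls letra =>
        if PySem.Str.isalpha letra then PySem.Set.add ls (String.ofList [letra]) else ls) := by
    funext ls letra
    by_cases ha : PySem.Str.isalpha letra
    · by_cases hc : ls.contains (String.ofList [letra]) <;>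
        simp [ha, PySem.Set.add, PySem.Set.contains]
    · simp [ha]
  rw [hstep, foldl_alpha_guard PySem.Set.add texto.toList [],
    PySem.Set.ofList_eq_foldl]

-- the per-letter loop counts occurrences of the letter's character
theorem ocorrenciasAltConta_eq (texto : String) (c : Char) :
    ocorrenciasAltConta texto (String.ofList [c]) = (texto.toList.count c : Int) := by
  unfold ocorrenciasAltConta
  rw [PySem.List.foldl_if_add_one (fun ch => String.ofList [ch] == String.ofList [c])]
  have hp : texto.toList.countP (fun ch => String.ofList [ch] == String.ofList [c])
      = texto.toList.count c := by
    unfold List.count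
    apply List.countP_congr
    intro ch _
    constructor
    · intro h
      have h1 : String.ofList [ch] = String.ofList [c] := by simpa using h
      have h2 := congrArg String.toList h1
      simp at h2
      simp [h2]
    · intro h
      have : ch = c := by simpa using h
      simp [this]
  simp [hp]

-- ===== VERDICT (by name: the statement is the Claim_ definition above) =====
theorem ocorrencias_spec : Claim_equal_ocorrencias := by
  intro texto _
  show ocorrencias texto = ocorrencias_alt texto
  simp only [ocorrencias, ocorrencias_alt]
  set L := (texto.toList.filter (fun c => PySem.Str.isalpha c)).map
      (fun c => String.ofList [c]) with hL
  -- the two item lists coincide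
  have hitems : (ocorrenciasCount texto).items
      = (ocorrenciasAltLetras texto).map (fun letra => (letra, ocorrenciasAltConta texto letra)) := by
    rw [ocorrenciasCount_items, ocorrenciasAltLetras_eq, ← hL]
    apply List.map_congr_left
    intro k hk
    have hkL : k ∈ L := (PySem.Set.mem_ofList _ _).mp hk
    obtain ⟨c, hc, rfl⟩ := List.mem_map.mp hkL
    have hfa : PySem.Str.isalpha c = true := List.of_mem_filter hc
    rw [ocorrenciasAltConta_eq]
    have hcountmap : L.count (String.ofList [c])
        = (texto.toList.filter (fun c => PySem.Str.isalpha c)).count c := by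
      rw [hL]
      refine List.count_map_of_injective _ (fun c => String.ofList [c]) ?_ c
      intro a b hab
      have h2 := congrArg String.toList hab
      simpa using h2
    have hcf : (texto.toList.filter (fun c => PySem.Str.isalpha c)).count c
        = texto.toList.count c := by
      rw [List.count_filter]
      simp [hfa]
    simp [hcountmap, hcf]
  rw [hitems]
  set items := (ocorrenciasAltLetras texto).map
      (fun letra => (letra, ocorrenciasAltConta texto letra)) with hitemsdef
  -- every frequency lies in [1, maxf]
  set maxf := PySem.List.maxD (items.map (fun it => it.2)) (fun v => v) 0 with hmaxf
  have hitems2 : items = (PySem.Set.ofList L).map (fun k => (k, (L.count k : Int))) := by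
    rw [← hitems, ocorrenciasCount_items, ← hL]
  have hpos : ∀ p ∈ items, 1 ≤ p.2 := by
    intro p hp
    rw [hitems2] at hp
    obtain ⟨k, hk, rfl⟩ := List.mem_map.mp hp
    have hkL : k ∈ L := (PySem.Set.mem_ofList _ _).mp hk
    have := List.count_pos_iff.mpr hkL
    simp only []
    omega
  have hall : ∀ p ∈ items, (p.2 : Int) ∈ PySem.List.pyRange 1 (maxf + 1) := by
    intro p hp
    rw [PySem.List.mem_pyRange_one]
    refine ⟨hpos p hp, ?_⟩
    have : p.2 ≤ maxf := le_maxD_of_mem _ p.2 (List.mem_map.mpr ⟨p, hp, rfl⟩)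
    omega
  -- A's two sorts are the bucket concatenations
  have hasc : PySem.List.sorted items (fun item => item.2) false
      = (PySem.List.pyRange 1 (maxf + 1)).flatMap fun k => items.filter fun it => it.2 == k := by
    rw [PySem.List.sorted_eq_foldl_insertBy]
    exact foldl_insertBy_buckets (fun item => item.2) (fun a b => decide (a < b))
      (by simp) (by intro a b h; simp at h ⊢; omega)
      items (PySem.List.pyRange 1 (maxf + 1))
      (List.Pairwise.imp (by intro a b h; simpa using h) (PySem.List.pairwise_lt_pyRange_one _ _))
      hall
  have hdesc : PySem.List.sorted items (fun item => item.2) true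
      = (PySem.List.pyRange 1 (maxf + 1)).reverse.flatMap fun k => items.filter fun it => it.2 == k := by
    rw [PySem.List.sorted_rev_eq_foldl_insertBy]
    exact foldl_insertBy_buckets (fun item => item.2) (fun a b => decide (b < a))
      (by simp) (by intro a b h; simp at h ⊢; omega)
      items (PySem.List.pyRange 1 (maxf + 1)).reverse
      (by
        rw [List.pairwise_reverse]
        exact List.Pairwise.imp (by intro a b h; simpa using h) (PySem.List.pairwise_lt_pyRange_one _ _))
      (by intro x hx; rw [List.mem_reverse]; exact hall x hx)
  rw [hasc, hdesc, foldl_buckets_pair]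
  simp
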